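-- pv_equiv track=rewrite | github.com/MuhammadAliyan10/Artificial-Intelligence | Harvard CS50/Optimization/Scheduling/Constrain Satisfaction/Schedule1.py | backtrack
-- ===== SOURCE A (Python) =====
-- VARIABLES = ["A", "B", "C", "D", "E", "F", "G"]
--
-- CONSTRAINTS = [
--     ("A", "B"),
--     ("A", "C"),
--     ("B", "C"),
--     ("B", "D"),
--     ("B", "E"),
--     ("C", "E"),
--     ("C", "F"),
--     ("D", "E"),
--     ("E", "F"),
--     ("E", "G"),
--     ("F", "G"),
-- ]
--
-- def backtrack(assignment):
--     if len(assignment) == len(VARIABLES):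
--         return assignment
--     var = select_unassigned_variable(assignment)
--     for value in ["Monday", "Tuesday", "Wednesday"]:
--         new_assignment = assignment.copy()
--         new_assignment[var] = value
--         if is_consistent(new_assignment):
--             result = backtrack(new_assignment)
--             if result is not None:
--                 return result
--     return None
--
-- def select_unassigned_variable(assignment):
--     for variable in VARIABLES:
--         if variable not in assignment:
--             return variable
--     return None
--
-- def is_consistent(assignment):
--     for x, y in CONSTRAINTS:
--         if x in assignment and y in assignment:
--             if assignment[x] == assignment[y]:
--                 return False
--     return True
-- ===== SOURCE B (Python) =====
-- VARIABLES = ["A", "B", "C", "D", "E", "F", "G"]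
--
-- CONSTRAINTS = [
--     ("A", "B"),
--     ("A", "C"),
--     ("B", "C"),
--     ("B", "D"),
--     ("B", "E"),
--     ("C", "E"),
--     ("C", "F"),
--     ("D", "E"),
--     ("E", "F"),
--     ("E", "G"),
--     ("F", "G"),
-- ]
--
-- def select_unassigned_variable(assignment):
--     for variable in VARIABLES:
--         if variable not in assignment:
--             return variable
--     return None
--
-- def is_consistent(assignment):
--     for x, y in CONSTRAINTS:
--         if x in assignment and y in assignment:
--             if assignment[x] == assignment[y]:
--                 return False
--     return True
--
-- def backtrack(assignment):
--     # Iterative DFS with an explicit stack of partial assignments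
--     # (same search order as the recursive solver: Monday first).
--     stack = [assignment]
--     while stack:
--         state = stack.pop()
--         if len(state) == len(VARIABLES):
--             return state
--         var = select_unassigned_variable(state)
--         children = []
--         for value in ["Monday", "Tuesday", "Wednesday"]:
--             child = state.copy()
--             child[var] = value
--             if is_consistent(child):
--                 children.append(child)
--         stack.extend(reversed(children))
--     return None
-- ===== Notes on version B (the rewrite author's own statement) =====
-- stated objective: alternative
-- what changed: Replaces A's recursive backtracking with an iterative depth-first search that keeps an explicit stack of partial assignments, pushing the consistent one-variable extensions in reverse so the search order (Monday first) and the first solution found are identical.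
import Mathlib
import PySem

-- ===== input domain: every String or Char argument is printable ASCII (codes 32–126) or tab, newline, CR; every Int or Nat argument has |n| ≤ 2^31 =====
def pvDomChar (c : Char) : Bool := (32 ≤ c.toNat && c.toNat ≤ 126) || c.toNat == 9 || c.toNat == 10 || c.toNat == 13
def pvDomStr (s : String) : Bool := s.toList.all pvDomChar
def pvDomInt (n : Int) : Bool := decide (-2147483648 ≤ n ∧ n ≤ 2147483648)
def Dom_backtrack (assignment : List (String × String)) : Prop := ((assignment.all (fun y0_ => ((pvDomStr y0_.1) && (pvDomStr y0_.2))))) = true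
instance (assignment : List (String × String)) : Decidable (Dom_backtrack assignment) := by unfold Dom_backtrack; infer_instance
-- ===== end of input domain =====

-- B replaces A's recursive backtracking with an iterative DFS over an explicit stack of
-- partial assignments (same search order, same helpers); objective: alternative control
-- structure, same cost. Neither implementation mutates the caller's dict.

-- ===== PORT A =====
def pyVARIABLES : List String := ["A", "B", "C", "D", "E", "F", "G"]

def pyCONSTRAINTS : List (String × String) :=
  [("A", "B"), ("A", "C"), ("B", "C"), ("B", "D"), ("B", "E"), ("C", "E"),
   ("C", "F"), ("D", "E"), ("E", "F"), ("E", "G"), ("F", "G")]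

-- the 'for variable in VARIABLES' loop of select_unassigned_variable
def select_unassigned_go (assignment : List (String × String)) : List String → Option String
  | [] => none
  | v :: vs =>
    if (PySem.Dict.mk assignment).contains v then select_unassigned_go assignment vs
    else some v

def select_unassigned_variable (assignment : List (String × String)) : Option String :=
  select_unassigned_go assignment pyVARIABLES

-- the 'for x, y in CONSTRAINTS' loop of is_consistent
def is_consistent_go (assignment : List (String × String)) : List (String × String) → Bool
  | [] => true
  | (x, y) :: cs =>
    if (PySem.Dict.mk assignment).contains x && (PySem.Dict.mk assignment).contains y then
      if (PySem.Dict.mk assignment).get? x == (PySem.Dict.mk assignment).get? y then false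
      else is_consistent_go assignment cs
    else is_consistent_go assignment cs

def is_consistent (assignment : List (String × String)) : Bool :=
  is_consistent_go assignment pyCONSTRAINTS

-- new_assignment = assignment.copy(); new_assignment[var] = value
def dinsert (assignment : List (String × String)) (k v : String) : List (String × String) :=
  ((PySem.Dict.mk assignment).insert k v).items

-- A's 'for value in [...]' loop, the recursive call passed in as `recur`
def goDays (recur : List (String × String) → Option (List (String × String)))
    (assignment : List (String × String)) (var : String) :
    List String → Option (List (String × String))
  | [] => none
  | value :: rest =>
    let na := dinsert assignment var value
    if is_consistent na then
      match recur na with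
      | some r => some r
      | none => goDays recur assignment var rest
    else goDays recur assignment var rest

def backtrackFuel : Nat → List (String × String) → Option (List (String × String))
  | 0, _ => none   -- fuel guard only (8 units suffice on Pre_)
  | fuel + 1, assignment =>
    if assignment.length = pyVARIABLES.length then some assignment
    else
      match select_unassigned_variable assignment with
      | none => none   -- here Python recurses forever; unreachable under Pre_
      | some var => goDays (backtrackFuel fuel) assignment var ["Monday", "Tuesday", "Wednesday"]

def backtrack (assignment : List (String × String)) : Option (List (String × String)) :=
  backtrackFuel 8 assignment

-- ===== PORT B =====
-- the 'for value in [...]: ... children.append(child)' loop of B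
def validChildren (state : List (String × String)) (var : String) : List (List (String × String)) :=
  ["Monday", "Tuesday", "Wednesday"].filterMap (fun value =>
    let child := dinsert state var value
    if is_consistent child then some child else none)

-- B's 'while stack' loop; head of the list = top of the stack
def loopB : Nat → List (List (String × String)) → Option (List (String × String))
  | 0, _ => none   -- fuel guard only (3280 steps suffice on Pre_)
  | _ + 1, [] => none
  | fuel + 1, state :: stack =>
    if state.length = pyVARIABLES.length then some state
    else
      match select_unassigned_variable state with
      | none => none   -- here Python B loops forever; unreachable under Pre_
      | some var => loopB fuel (validChildren state var ++ stack)

def backtrack_alt (assignment : List (String × String)) : Option (List (String × String)) :=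
  loopB 3280 [assignment]

-- ===== PRECONDITION & SPEC =====
-- Pre_ excludes association lists with duplicate keys (a Python dict cannot contain them)
-- and assignments with more than 7 entries, on which A either hits the recursion limit
-- (RecursionError) or, when the given day values already conflict, returns None just as B does.
def Pre_backtrack (assignment : List (String × String)) : Prop :=
  (assignment.map Prod.fst).Nodup ∧ assignment.length ≤ 7

instance (assignment : List (String × String)) : Decidable (Pre_backtrack assignment) := by
  unfold Pre_backtrack; infer_instance

def pvWitness_backtrack : (List (String × String)) := [("A", "Monday"), ("X", "Tuesday")]

def Spec_backtrack (assignment : List (String × String)) (out : Option (List (String × String))) : Prop := out = backtrack_alt assignment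
instance (assignment : List (String × String)) (out : Option (List (String × String))) : Decidable (Spec_backtrack assignment out) := by unfold Spec_backtrack; infer_instance

-- ===== CLAIM (what is proved, stated in full; the proofs are below) =====
def Claim_equal_backtrack : Prop := ∀ (assignment : List (String × String)), Dom_backtrack assignment → Pre_backtrack assignment → Spec_backtrack assignment (backtrack assignment)

-- ===== LEMMAS AND PROOFS =====

theorem contains_mk_eq_false_iff (a : List (String × String)) (k : String) :
    (PySem.Dict.mk a).contains k = false ↔ k ∉ a.map Prod.fst := by
  rw [PySem.Dict.contains_eq_decide_mem_keys]
  simp [PySem.Dict.keys]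

theorem dinsert_eq_append (a : List (String × String)) (k v : String)
    (h : (PySem.Dict.mk a).contains k = false) : dinsert a k v = a ++ [(k, v)] :=
  PySem.Dict.items_insert_of_not_contains (PySem.Dict.mk a) v h

theorem length_dinsert (a : List (String × String)) (k v : String)
    (h : (PySem.Dict.mk a).contains k = false) :
    (dinsert a k v).length = a.length + 1 := by
  rw [dinsert_eq_append a k v h]; simp

theorem pre_dinsert (a : List (String × String)) (k v : String)
    (hpre : Pre_backtrack a) (hlt : a.length < 7)
    (h : (PySem.Dict.mk a).contains k = false) :
    Pre_backtrack (dinsert a k v) := by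
  obtain ⟨hnd, hle⟩ := hpre
  rw [dinsert_eq_append a k v h]
  refine ⟨?_, by simp; omega⟩
  rw [contains_mk_eq_false_iff] at h
  simp [List.nodup_append, hnd]
  intro a1 x hmem heq
  exact h (heq ▸ List.mem_map.mpr ⟨(a1, x), hmem, rfl⟩)

theorem select_go_some (a : List (String × String)) :
    ∀ l v, select_unassigned_go a l = some v → (PySem.Dict.mk a).contains v = false := by
  intro l
  induction l with
  | nil => intro v h; simp [select_unassigned_go] at h
  | cons x xs ih =>
    intro v h
    simp only [select_unassigned_go] at h
    by_cases hc : (PySem.Dict.mk a).contains x = true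
    · rw [if_pos hc] at h; exact ih v h
    · rw [if_neg hc] at h
      obtain rfl : x = v := by injection h
      exact Bool.eq_false_iff.mpr hc

theorem select_go_none (a : List (String × String)) :
    ∀ l, select_unassigned_go a l = none → ∀ v ∈ l, (PySem.Dict.mk a).contains v = true := by
  intro l
  induction l with
  | nil => intro _ v hv; simp at hv
  | cons x xs ih =>
    intro h v hv
    simp only [select_unassigned_go] at h
    by_cases hc : (PySem.Dict.mk a).contains x = true
    · rw [if_pos hc] at h
      rcases List.mem_cons.mp hv with rfl | hv'
      · exact hc
      · exact ih h v hv'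
    · rw [if_neg hc] at h; exact absurd h (by simp)

theorem select_some_of_lt (a : List (String × String)) (_hpre : Pre_backtrack a)
    (hlt : a.length < 7) : ∃ v, select_unassigned_variable a = some v := by
  cases hsel : select_unassigned_variable a with
  | some v => exact ⟨v, rfl⟩
  | none =>
    exfalso
    have hall := select_go_none a pyVARIABLES hsel
    have hsub : pyVARIABLES ⊆ a.map Prod.fst := by
      intro v hv
      have := hall v hv
      have hmem := (PySem.Dict.contains_eq_decide_mem_keys (PySem.Dict.mk a) v) ▸ this
      simpa [PySem.Dict.keys] using of_decide_eq_true hmem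
    have hnd : pyVARIABLES.Nodup := by decide
    have hlen : pyVARIABLES.length ≤ (a.map Prod.fst).length :=
      (List.subperm_of_subset hnd hsub).length_le
    simp [pyVARIABLES] at hlen
    omega

-- A's result with exactly enough fuel; the chain of first matches over a list of states
def firstA : List (List (String × String)) → Option (List (String × String))
  | [] => none
  | s :: rest =>
    match backtrackFuel (8 - s.length) s with
    | some r => some r
    | none => firstA rest

def nodesN : Nat → Nat
  | 0 => 1
  | k + 1 => 3 * nodesN k + 1

def wt (s : List (String × String)) : Nat := nodesN (7 - s.length)

theorem nodesN_pos (k : Nat) : 1 ≤ nodesN k := by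
  cases k <;> simp [nodesN]

theorem goDays_congr (r1 r2 : List (String × String) → Option (List (String × String)))
    (a : List (String × String)) (var : String) :
    ∀ days, (∀ value ∈ days, r1 (dinsert a var value) = r2 (dinsert a var value)) →
      goDays r1 a var days = goDays r2 a var days := by
  intro days
  induction days with
  | nil => intro _; rfl
  | cons v vs ih =>
    intro h
    simp only [goDays]
    rw [h v (by simp)]
    cases r2 (dinsert a var v) <;> split <;> simp [ih fun x hx => h x (by simp [hx])]

theorem bt_fuel_stable :
    ∀ k (a : List (String × String)) (f : Nat), Pre_backtrack a →
      7 - a.length ≤ k → 8 - a.length ≤ f →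
      backtrackFuel f a = backtrackFuel (8 - a.length) a := by
  intro k
  induction k with
  | zero =>
    intro a f hpre h7 h8
    have hlen : a.length = 7 := by have := hpre.2; omega
    obtain ⟨f', rfl⟩ : ∃ f', f = f' + 1 := ⟨f - 1, by omega⟩
    have h1 : 8 - a.length = 1 := by omega
    rw [h1]
    simp only [backtrackFuel]
    rw [if_pos (by simp [pyVARIABLES]; omega), if_pos (by simp [pyVARIABLES]; omega)]
  | succ k ih =>
    intro a f hpre h7 h8
    have hle := hpre.2
    obtain ⟨f', rfl⟩ : ∃ f', f = f' + 1 := ⟨f - 1, by omega⟩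
    by_cases hlen : a.length = 7
    · have h1 : 8 - a.length = 1 := by omega
      rw [h1]
      simp only [backtrackFuel]
      rw [if_pos (by simp [pyVARIABLES]; omega), if_pos (by simp [pyVARIABLES]; omega)]
    · have hlt : a.length < 7 := by have := hpre.2; omega
      have hm : 8 - a.length = (7 - a.length) + 1 := by omega
      rw [hm]
      simp only [backtrackFuel]
      rw [if_neg (by simp [pyVARIABLES]; omega), if_neg (by simp [pyVARIABLES]; omega)]
      obtain ⟨var, hsel⟩ := select_some_of_lt a hpre hlt
      rw [hsel]
      apply goDays_congr
      intro value _
      have hc : (PySem.Dict.mk a).contains var = false := select_go_some a pyVARIABLES var hsel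
      have hclen : (dinsert a var value).length = a.length + 1 := length_dinsert a var value hc
      have hcpre : Pre_backtrack (dinsert a var value) := pre_dinsert a var value hpre hlt hc
      have e1 := ih (dinsert a var value) f' hcpre (by omega) (by omega)
      have e2 := ih (dinsert a var value) (7 - a.length) hcpre (by omega) (by omega)
      rw [e1, e2]

theorem mem_validChildren (a : List (String × String)) (var : String)
    (c : List (String × String)) (h : c ∈ validChildren a var) :
    ∃ value, c = dinsert a var value := by
  simp only [validChildren, List.mem_filterMap] at h
  obtain ⟨value, _, hv⟩ := h
  by_cases hcons : is_consistent (dinsert a var value) <;> simp [hcons] at hv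
  exact ⟨value, hv.symm⟩

theorem goDays_eq_firstA (a : List (String × String)) (var : String)
    (hc : (PySem.Dict.mk a).contains var = false) :
    ∀ days, goDays (backtrackFuel (7 - a.length)) a var days =
      firstA (days.filterMap (fun value =>
        let child := dinsert a var value
        if is_consistent child then some child else none)) := by
  intro days
  induction days with
  | nil => rfl
  | cons v vs ih =>
    have hlen : (dinsert a var v).length = a.length + 1 := length_dinsert a var v hc
    by_cases hcons : is_consistent (dinsert a var v)
    · simp only [goDays, List.filterMap_cons, hcons, if_pos]
      simp only [firstA]
      have h8 : 8 - (dinsert a var v).length = 7 - a.length := by omega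
      rw [h8]
      cases backtrackFuel (7 - a.length) (dinsert a var v) <;> simp [ih]
    · simp only [goDays, List.filterMap_cons, hcons]
      simpa using ih

theorem firstA_append (xs ys : List (List (String × String))) :
    firstA (xs ++ ys) =
      match firstA xs with
      | some r => some r
      | none => firstA ys := by
  induction xs with
  | nil => rfl
  | cons s rest ih =>
    cases he : backtrackFuel (8 - s.length) s with
    | none => simp only [List.cons_append, firstA, he]; exact ih
    | some r => simp only [List.cons_append, firstA, he]

theorem sum_map_const (f : List (String × String) → Nat) (c : Nat) :
    ∀ l : List (List (String × String)), (∀ x ∈ l, f x = c) → (l.map f).sum = l.length * c := by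
  intro l
  induction l with
  | nil => intro _; simp
  | cons x xs ih =>
    intro h
    simp [h x (by simp), ih fun y hy => h y (by simp [hy])]
    ring

theorem validChildren_length_le (a : List (String × String)) (var : String) :
    (validChildren a var).length ≤ 3 := by
  have := List.length_filterMap_le (fun value =>
    let child := dinsert a var value
    if is_consistent child then some child else none) ["Monday", "Tuesday", "Wednesday"]
  simpa [validChildren] using this

theorem loop_firstA :
    ∀ n (stack : List (List (String × String))),
      (∀ s ∈ stack, Pre_backtrack s) → (stack.map wt).sum ≤ n →
      loopB n stack = firstA stack := by
  intro n
  induction n with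
  | zero =>
    intro stack hg hsum
    cases stack with
    | nil => rfl
    | cons s rest =>
      exfalso
      have := nodesN_pos (7 - s.length)
      simp [wt] at hsum
      omega
  | succ n ih =>
    intro stack hg hsum
    cases stack with
    | nil => rfl
    | cons s rest =>
      have hpre : Pre_backtrack s := hg s (by simp)
      by_cases hlen : s.length = 7
      · simp only [loopB]
        rw [if_pos (by simp [pyVARIABLES]; omega)]
        simp only [firstA]
        have h1 : 8 - s.length = 1 := by omega
        rw [h1]
        simp only [backtrackFuel]
        rw [if_pos (by simp [pyVARIABLES]; omega)]
      · have hlt : s.length < 7 := by have := hpre.2; omega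
        obtain ⟨var, hsel⟩ := select_some_of_lt s hpre hlt
        have hc : (PySem.Dict.mk s).contains var = false := select_go_some s pyVARIABLES var hsel
        simp only [loopB]
        rw [if_neg (by simp [pyVARIABLES]; omega), hsel]
        show loopB n (validChildren s var ++ rest) = firstA (s :: rest)
        -- children facts
        have hwt : ∀ c ∈ validChildren s var, wt c = nodesN (6 - s.length) := by
          intro c hcm
          obtain ⟨value, rfl⟩ := mem_validChildren s var c hcm
          have := length_dinsert s var value hc
          simp [wt, this]
        have hcg : ∀ c ∈ validChildren s var, Pre_backtrack c := by
          intro c hcm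
          obtain ⟨value, rfl⟩ := mem_validChildren s var c hcm
          exact pre_dinsert s var value hpre hlt hc
        have hsum' : ((validChildren s var ++ rest).map wt).sum ≤ n := by
          have h1 : ((validChildren s var).map wt).sum =
              (validChildren s var).length * nodesN (6 - s.length) :=
            sum_map_const wt (nodesN (6 - s.length)) _ hwt
          have h2 := validChildren_length_le s var
          have h3 : nodesN (7 - s.length) = 3 * nodesN (6 - s.length) + 1 := by
            have h4 : 7 - s.length = (6 - s.length) + 1 := by omega
            rw [h4]; rfl
          have h5 : ((validChildren s var).map wt).sum ≤ 3 * nodesN (6 - s.length) := by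
            rw [h1]; exact Nat.mul_le_mul_right _ h2
          simp only [List.map_append, List.sum_append]
          simp [wt] at hsum
          omega
        rw [ih (validChildren s var ++ rest)
          (by intro c hcm
              rcases List.mem_append.mp hcm with h | h
              · exact hcg c h
              · exact hg c (by simp [h]))
          hsum']
        rw [firstA_append]
        -- now compute firstA (s :: rest)
        have hstep : backtrackFuel (8 - s.length) s =
            firstA (validChildren s var) := by
          have hm : 8 - s.length = (7 - s.length) + 1 := by omega
          rw [hm]
          simp only [backtrackFuel]
          rw [if_neg (by simp [pyVARIABLES]; omega), hsel]
          exact goDays_eq_firstA s var hc _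
        simp only [firstA, hstep]

theorem nodesN_le (k : Nat) (h : k ≤ 7) : nodesN k ≤ 3280 := by
  interval_cases k <;> simp [nodesN]

-- ===== VERDICT (by name: the statement is the Claim_ definition above) =====
theorem backtrack_spec : Claim_equal_backtrack := by
  intro a _hdom hpre
  unfold Spec_backtrack backtrack backtrack_alt
  have h1 : backtrackFuel 8 a = backtrackFuel (8 - a.length) a :=
    bt_fuel_stable 7 a 8 hpre (by omega) (by have := hpre.2; omega)
  have h2 : loopB 3280 [a] = firstA [a] := by
    apply loop_firstA
    · intro s hs; simp at hs; subst hs; exact hpre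
    · simp [wt]
      exact nodesN_le _ (by omega)
  rw [h1, h2]
  simp only [firstA]
  cases backtrackFuel (8 - a.length) a <;> rfl
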